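-- pv_equiv track=rewrite | github.com/MatejKorz/AoC_2023 | day12.py | gen_possible_lines
-- ===== SOURCE A (Python) =====
-- from typing import List, Tuple
--
-- POS = ['.', '#']
--
-- UNKNOWN = '?'
--
-- def gen_rec(cnt, curr: str, res: List[str]) -> None:
--     if cnt == 0:
--         res.append(curr)
--         return
--     for char in POS:
--         gen_rec(cnt - 1, curr + char, res)
--
-- def gen_possible_inputs(cnt) -> List[str]:
--     res = []
--     gen_rec(cnt, "", res)
--     return res
--
-- def gen_possible_lines(line: str) -> List[str]:
--     gens = gen_possible_inputs(line.count(UNKNOWN))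
--     rv = []
--     for gen in gens:
--         work_line = ""
--         gen_index = 0
--         for char in line:
--             if char == UNKNOWN:
--                 work_line += gen[gen_index]
--                 gen_index += 1
--             else:
--                 work_line += char
--         rv.append(work_line)
--     return rv
-- ===== SOURCE B (Python) =====
-- def gen_possible_lines(line: str) -> list:
--     prefixes = [[]]
--     for char in line:
--         if char == '?':
--             expanded = []
--             for s in prefixes:
--                 expanded.append(s + ['.'])
--                 expanded.append(s + ['#'])
--             prefixes = expanded
--         else:
--             for s in prefixes:
--                 s.append(char)
--     return [''.join(s) for s in prefixes]
-- ===== Notes on version B (the rewrite author's own statement) =====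
-- stated objective: simpler
-- what changed: B builds the result in a single left-to-right pass over the line, branching every current prefix on the two fill characters at each unknown position, instead of first enumerating all fillings recursively and then substituting each into the line.
import Mathlib
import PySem

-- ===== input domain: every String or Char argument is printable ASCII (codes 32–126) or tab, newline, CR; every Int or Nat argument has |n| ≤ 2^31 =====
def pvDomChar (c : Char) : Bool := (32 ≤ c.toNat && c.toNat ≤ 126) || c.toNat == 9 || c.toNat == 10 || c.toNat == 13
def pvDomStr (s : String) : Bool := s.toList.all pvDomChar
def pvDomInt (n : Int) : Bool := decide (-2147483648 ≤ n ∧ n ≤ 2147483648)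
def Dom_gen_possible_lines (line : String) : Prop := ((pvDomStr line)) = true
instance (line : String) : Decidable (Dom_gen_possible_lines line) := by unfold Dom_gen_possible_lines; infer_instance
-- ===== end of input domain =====

-- B builds the result in one left-to-right pass, branching each prefix on the two fill
-- characters at every unknown position, instead of A's recursive generation of all fillings
-- followed by a substitution pass; objective: simpler (same output list, same order).

-- ===== PORT A =====
-- POS = ['.', '#']
def pvPOS : List Char := ['.', '#']
-- UNKNOWN = '?'
def pvUNKNOWN : Char := '?'

-- gen_rec(cnt, curr, res): Python mutates res in place; the port threads it and returns the final list
def gen_rec_port : Nat → List Char → List (List Char) → List (List Char)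
  | 0, curr, res => res ++ [curr]
  | n + 1, curr, res => pvPOS.foldl (fun acc ch => gen_rec_port n (curr ++ [ch]) acc) res

def gen_possible_inputs_port (cnt : Nat) : List (List Char) := gen_rec_port cnt [] []

-- body of A's inner 'for char in line' loop; state = (work_line, gen_index)
def pySubstStep (gen : List Char) (st : List Char × Nat) (ch : Char) : List Char × Nat :=
  -- gen[gen_index]: always in range, since len(gen) = line.count('?'); getD is exact here
  if ch = pvUNKNOWN then (st.1 ++ [gen.getD st.2 ' '], st.2 + 1) else (st.1 ++ [ch], st.2)

def gen_possible_lines (line : String) : List String :=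
  let gens := gen_possible_inputs_port (PySem.Str.count line "?")
  (gens.foldl (fun rv gen => rv ++ [(line.toList.foldl (pySubstStep gen) ([], 0)).1]) []).map
    String.ofList

-- ===== PORT B =====
-- body of B's 'for char in line' loop over the current prefix list
def altStep (prefixes : List (List Char)) (ch : Char) : List (List Char) :=
  if ch = '?' then prefixes.foldl (fun expanded s => expanded ++ [s ++ ['.'], s ++ ['#']]) []
  else prefixes.map (fun s => s ++ [ch])

def gen_possible_lines_alt (line : String) : List String :=
  (line.toList.foldl altStep [[]]).map String.ofList

-- ===== PRECONDITION & SPEC =====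
def Spec_gen_possible_lines (line : String) (out : List String) : Prop := out = gen_possible_lines_alt line
instance (line : String) (out : List String) : Decidable (Spec_gen_possible_lines line out) := by unfold Spec_gen_possible_lines; infer_instance

-- ===== CLAIM (what is proved, stated in full; the proofs are below) =====
def Claim_equal_gen_possible_lines : Prop := ∀ (line : String), Dom_gen_possible_lines line → Spec_gen_possible_lines line (gen_possible_lines line)

-- ===== LEMMAS AND PROOFS =====

-- all fillings of length n over '.'/'#', first position varying slowest ('.' before '#')
def allFill : Nat → List (List Char)
  | 0 => [[]]
  | n + 1 => (allFill n).map ('.' :: ·) ++ (allFill n).map ('#' :: ·)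

-- substitute the characters of g for the '?'s of the first argument, in order
def substF : List Char → List Char → List Char
  | [], _ => []
  | c :: cs, g => if c = '?' then g.headD ' ' :: substF cs g.tail else c :: substF cs g

-- all completions of a pattern, in the order both programs produce
def comps : List Char → List (List Char)
  | [] => [[]]
  | c :: cs => if c = '?' then (comps cs).map ('.' :: ·) ++ (comps cs).map ('#' :: ·)
               else (comps cs).map (c :: ·)

theorem gen_rec_eq (n : Nat) : ∀ (curr : List Char) (res : List (List Char)),
    gen_rec_port n curr res = res ++ (allFill n).map (curr ++ ·) := by
  induction n with
  | zero => intro curr res; simp [gen_rec_port, allFill]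
  | succ n ih =>
    intro curr res
    simp [gen_rec_port, pvPOS, allFill, ih, List.map_map, Function.comp_def, List.append_assoc]

theorem count_go_single (l : List Char) : ∀ (fuel acc : Nat), l.length ≤ fuel →
    PySem.Chars.count.go ['?'] fuel l acc = acc + l.count '?' := by
  induction l with
  | nil => intro fuel acc _; cases fuel <;> simp [PySem.Chars.count.go]
  | cons h t ih =>
    intro fuel acc hf
    cases fuel with
    | zero => simp at hf
    | succ n =>
      have step : PySem.Chars.count.go ['?'] (n + 1) (h :: t) acc =
          if '?' = h then PySem.Chars.count.go ['?'] n t (acc + 1)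
          else PySem.Chars.count.go ['?'] n t acc := by
        simp [PySem.Chars.count.go, List.isPrefixOf]
      rw [step]
      have hf' : t.length ≤ n := by simpa using hf
      split_ifs with hq
      · rw [ih n (acc + 1) hf', List.count_cons, hq]; simp; ring
      · rw [ih n acc hf', List.count_cons]
        simp [show ¬ h = '?' from fun e => hq e.symm]

theorem count_single (cs : List Char) : PySem.Chars.count cs ['?'] = cs.count '?' := by
  simpa [PySem.Chars.count] using count_go_single cs cs.length 0 (le_refl _)

-- A's inner loop computes substF, consuming gen from position idx on
theorem subst_fold (gen : List Char) (cs : List Char) : ∀ (work : List Char) (idx : Nat),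
    cs.foldl (pySubstStep gen) (work, idx)
      = (work ++ substF cs (gen.drop idx), idx + cs.count '?') := by
  induction cs with
  | nil => intro work idx; simp [substF]
  | cons c cs ih =>
    intro work idx
    by_cases hc : c = '?'
    · subst hc
      have h1 : pySubstStep gen (work, idx) '?' = (work ++ [gen.getD idx ' '], idx + 1) := by
        simp [pySubstStep, pvUNKNOWN]
      have h2 : gen.getD idx ' ' = (gen.drop idx).headD ' ' := by
        simp [List.getD_eq_getElem?_getD, List.headD_eq_head?_getD, List.head?_drop]
      rw [List.foldl_cons, h1, ih]
      simp [substF, List.tail_drop]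
      omega
    · have h1 : pySubstStep gen (work, idx) c = (work ++ [c], idx) := by
        simp [pySubstStep, pvUNKNOWN, hc]
      rw [List.foldl_cons, h1, ih]
      simp [substF, hc]

theorem map_subst_allFill (cs : List Char) :
    (allFill (cs.count '?')).map (fun g => substF cs g) = comps cs := by
  induction cs with
  | nil => simp [allFill, substF, comps]
  | cons c cs ih =>
    by_cases hc : c = '?'
    · subst hc
      simp only [comps, List.count_cons]
      have h1 : cs.count '?' + (if ('?' == '?') = true then 1 else 0) = cs.count '?' + 1 := by simp
      rw [h1]
      simp only [allFill, List.map_append, List.map_map]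
      rw [← ih]
      simp [Function.comp_def, substF]
    · simp only [comps, if_neg hc, List.count_cons]
      have h1 : cs.count '?' + (if (c == '?') = true then 1 else 0) = cs.count '?' := by simp [hc]
      rw [h1, ← ih]
      simp [List.map_map, Function.comp_def, substF, hc]

-- B's loop appends every completion of the remaining pattern to every current prefix
theorem alt_fold (cs : List Char) : ∀ (ps : List (List Char)),
    cs.foldl altStep ps = ps.flatMap (fun s => (comps cs).map (s ++ ·)) := by
  induction cs with
  | nil => intro ps; simp [comps]
  | cons c cs ih =>
    intro ps
    by_cases hc : c = '?'
    · subst hc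
      have hstep : altStep ps '?' = ps.flatMap (fun s => [s ++ ['.'], s ++ ['#']]) := by
        simp only [altStep]
        rw [PySem.List.foldl_append_eq_flatMap]; simp
      rw [List.foldl_cons, hstep, ih, List.flatMap_assoc]
      simp only [comps]
      simp [List.map_map, Function.comp_def, List.append_assoc]
    · have hstep : altStep ps c = ps.map (fun s => s ++ [c]) := by simp [altStep, hc]
      rw [List.foldl_cons, hstep, ih, List.flatMap_map]
      simp only [comps, if_neg hc]
      simp [List.map_map, Function.comp_def, List.append_assoc]

theorem ports_agree (line : String) : gen_possible_lines line = gen_possible_lines_alt line := by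
  simp only [gen_possible_lines, gen_possible_lines_alt]
  have hcnt : PySem.Str.count line "?" = line.toList.count '?' := by
    rw [PySem.Str.count_eq]
    exact count_single line.toList
  rw [hcnt, PySem.List.foldl_append_singleton_eq_map, alt_fold]
  have hgens : gen_possible_inputs_port (line.toList.count '?')
      = allFill (line.toList.count '?') := by
    unfold gen_possible_inputs_port
    rw [gen_rec_eq]; simp
  rw [hgens]
  have hsub : ∀ gen : List Char,
      (line.toList.foldl (pySubstStep gen) ([], 0)).1 = substF line.toList gen := by
    intro gen; rw [subst_fold]; simp
  simp only [List.nil_append, hsub]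
  rw [map_subst_allFill]
  simp

-- ===== VERDICT (by name: the statement is the Claim_ definition above) =====
theorem gen_possible_lines_spec : Claim_equal_gen_possible_lines := by
  intro line _
  exact ports_agree line
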